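-- pv_equiv track=rewrite | github.com/hero-rq/Yoki | how_long_sequence_even.py | longest_even_sum_subarray
-- ===== SOURCE A (Python) =====
-- from typing import List
--
-- def longest_even_sum_subarray(nums: List[int]) -> int:
--     if not nums:
--         return 0
--
--     check_list = []
--
--     for start in range(len(nums)):
--         current_sum = 0
--         best_length = 0
--         for end in range(start, len(nums)):
--             current_sum += nums[end]
--             if current_sum % 2 == 0:
--                 best_length += 1
--         check_list.append(best_length)
--
--     return max(check_list)
-- ===== SOURCE B (Python) =====
-- from typing import List
--
-- def longest_even_sum_subarray(nums: List[int]) -> int: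
--     # One right-to-left pass over prefix parities: sum(nums[s:e+1]) is even
--     # iff the suffix sums nums[s:] and nums[e+1:] have the same parity, so the
--     # count for a start s is the number of later suffix parities equal to its own.
--     t = 0          # parity of the suffix sum processed so far
--     c0, c1 = 1, 0  # counts of suffix parities seen so far (empty suffix is even)
--     best = 0
--     for x in reversed(nums):
--         t = (t + x) % 2
--         c = c0 if t == 0 else c1
--         if c > best:
--             best = c
--         if t == 0:
--             c0 += 1
--         else:
--             c1 += 1
--     return best
-- ===== Notes on version B (the rewrite author's own statement) =====
-- stated objective: faster
-- what changed: Replaced A's nested start/end rescan of every suffix by a single right-to-left pass over suffix-sum parities that keeps two parity counters and a running maximum (sum(nums[s:e+1]) is even iff the suffix sums nums[s:] and nums[e+1:] have equal parity).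
import Mathlib
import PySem

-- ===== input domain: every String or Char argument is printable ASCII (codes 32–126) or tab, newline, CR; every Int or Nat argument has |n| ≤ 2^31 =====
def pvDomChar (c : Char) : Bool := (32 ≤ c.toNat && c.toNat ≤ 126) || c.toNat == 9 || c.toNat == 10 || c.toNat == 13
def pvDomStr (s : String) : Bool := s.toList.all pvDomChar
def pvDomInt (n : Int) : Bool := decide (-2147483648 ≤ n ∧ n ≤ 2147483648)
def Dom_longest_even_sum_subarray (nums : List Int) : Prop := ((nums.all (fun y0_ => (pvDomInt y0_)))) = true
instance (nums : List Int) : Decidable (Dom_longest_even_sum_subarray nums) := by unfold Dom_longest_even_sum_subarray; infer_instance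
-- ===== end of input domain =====

-- B replaces A's quadratic start×end scan by a single right-to-left pass over suffix-sum
-- parities with two running parity counts (objective: faster, O(n) instead of O(n^2)).

-- ===== PORT A =====
-- inner loop body: current_sum += nums[end]; if current_sum % 2 == 0: best_length += 1
def aInner (st : Int × Int) (v : Int) : Int × Int :=
  let cs := st.1 + v
  if PySem.Int.mod cs 2 = 0 then (cs, st.2 + 1) else (cs, st.2)

def longest_even_sum_subarray (nums : List Int) : Int :=
  if nums = [] then 0
  else
    ((PySem.List.max? ((PySem.List.pyRange 0 (nums.length : Int) 1).map (fun start =>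
      ((PySem.List.pyRange start (nums.length : Int) 1).foldl
        (fun st e => aInner st (PySem.List.pyGetD nums e 0)) (0, 0)).2)) (fun y => y)).getD 0)

-- ===== PORT B =====
-- one step of Source B's loop over reversed(nums); state (t, c0, c1, best)
def bStep (st : Int × Int × Int × Int) (x : Int) : Int × Int × Int × Int :=
  let t := PySem.Int.mod (st.1 + x) 2
  let c := if t = 0 then st.2.1 else st.2.2.1
  let best := if c > st.2.2.2 then c else st.2.2.2
  if t = 0 then (t, st.2.1 + 1, st.2.2.1, best)
  else (t, st.2.1, st.2.2.1 + 1, best)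

def longest_even_sum_subarray_alt (nums : List Int) : Int :=
  (nums.reverse.foldl bStep (0, 1, 0, 0)).2.2.2

-- ===== PRECONDITION & SPEC =====
def Spec_longest_even_sum_subarray (nums : List Int) (out : Int) : Prop := out = longest_even_sum_subarray_alt nums
instance (nums : List Int) (out : Int) : Decidable (Spec_longest_even_sum_subarray nums out) := by unfold Spec_longest_even_sum_subarray; infer_instance

-- ===== CLAIM (what is proved, stated in full; the proofs are below) =====
def Claim_equal_longest_even_sum_subarray : Prop := ∀ (nums : List Int), Dom_longest_even_sum_subarray nums → Spec_longest_even_sum_subarray nums (longest_even_sum_subarray nums)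

-- ===== LEMMAS AND PROOFS =====

-- parity of a list's sum
def spar (l : List Int) : Int := l.sum % 2

-- number of suffixes of l (including l itself and []) whose sum has parity p
def pcnt : List Int → Int → Int
  | [], p => if (0 : Int) = p then 1 else 0
  | x :: xs, p => (if spar (x :: xs) = p then 1 else 0) + pcnt xs p

-- what A's inner loop counts, with carried sum c
def cnt : List Int → Int → Int
  | [], _ => 0
  | x :: xs, c => (if (c + x) % 2 = 0 then (1 : Int) else 0) + cnt xs (c + x)

-- the common value: max over nonempty suffixes of the inner count
def gbest : List Int → Int
  | [] => 0
  | x :: xs => max (cnt (x :: xs) 0) (gbest xs)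

def aList (l : List Int) : List Int := (List.range l.length).map (fun k => cnt (l.drop k) 0)

lemma spar_cases (l : List Int) : spar l = 0 ∨ spar l = 1 := by
  unfold spar; omega

lemma cnt_nonneg : ∀ (l : List Int) (c : Int), 0 ≤ cnt l c := by
  intro l
  induction l with
  | nil => intro c; simp [cnt]
  | cons x xs ih => intro c; have := ih (c + x); simp only [cnt]; split_ifs <;> omega

lemma inner_eq : ∀ (sub : List Int) (c b : Int),
    (sub.foldl aInner (c, b)).2 = b + cnt sub c := by
  intro sub
  induction sub with
  | nil => intro c b; simp [cnt]
  | cons x xs ih =>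
    intro c b
    simp only [List.foldl_cons, aInner, cnt,
      PySem.Int.mod_eq_emod_of_pos (a := c + x) (by norm_num : (0:Int) < 2)]
    split_ifs with h
    · rw [ih]; ring
    · rw [ih]; ring

lemma cnt_eq : ∀ (xs : List Int) (x c : Int),
    cnt (x :: xs) c = pcnt xs ((c + x + xs.sum) % 2) := by
  intro xs
  induction xs with
  | nil =>
    intro x c
    simp only [cnt, pcnt, List.sum_nil, add_zero]
    split_ifs <;> omega
  | cons y ys ih =>
    intro x c
    have h1 : cnt (x :: y :: ys) c
        = (if (c + x) % 2 = 0 then (1 : Int) else 0) + cnt (y :: ys) (c + x) := rfl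
    rw [h1, ih y (c + x)]
    have h2 : pcnt (y :: ys) ((c + x + (y :: ys).sum) % 2)
        = (if spar (y :: ys) = (c + x + (y :: ys).sum) % 2 then (1 : Int) else 0)
          + pcnt ys ((c + x + (y :: ys).sum) % 2) := rfl
    rw [h2]
    have hs : c + x + (y :: ys).sum = c + x + y + ys.sum := by
      simp [List.sum_cons]; ring
    rw [hs]
    have hspar : spar (y :: ys) = (y + ys.sum) % 2 := by
      simp [spar, List.sum_cons]
    rw [hspar]
    split_ifs <;> omega

lemma foldl_max_init : ∀ (L : List Int) (a b : Int),
    L.foldl max (max a b) = max a (L.foldl max b) := by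
  intro L
  induction L with
  | nil => intro a b; simp
  | cons x t ih =>
    intro a b
    simp only [List.foldl_cons, max_assoc]
    exact ih a (max b x)

lemma aList_nil : aList [] = [] := by simp [aList]

lemma aList_cons (x : Int) (xs : List Int) :
    aList (x :: xs) = cnt (x :: xs) 0 :: aList xs := by
  simp [aList, List.range_succ_eq_map, List.map_map, Function.comp]

lemma maxA : ∀ (xs : List Int) (x : Int),
    (aList xs).foldl max (cnt (x :: xs) 0) = gbest (x :: xs) := by
  intro xs
  induction xs with
  | nil =>
    intro x
    simp [aList_nil, gbest, max_eq_left (cnt_nonneg [x] 0)]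
  | cons y ys ih =>
    intro x
    rw [aList_cons, List.foldl_cons, foldl_max_init, ih y]
    simp [gbest]

lemma B_inv : ∀ (l : List Int),
    l.foldr (fun x st => bStep st x) ((0 : Int), (1 : Int), (0 : Int), (0 : Int))
      = (spar l, pcnt l 0, pcnt l 1, gbest l) := by
  intro l
  induction l with
  | nil => simp [spar, pcnt, gbest]
  | cons x xs ih =>
    rw [List.foldr_cons, ih]
    have htg : PySem.Int.mod (spar xs + x) 2 = spar (x :: xs) := by
      rw [PySem.Int.mod_eq_emod_of_pos (by norm_num : (0:Int) < 2)]
      simp only [spar, List.sum_cons]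
      omega
    have hc : cnt (x :: xs) 0 = pcnt xs (spar (x :: xs)) := by
      rw [cnt_eq]
      congr 1
      simp only [spar, List.sum_cons]
      omega
    have hg : gbest (x :: xs) = max (cnt (x :: xs) 0) (gbest xs) := rfl
    rcases spar_cases (x :: xs) with h | h
    · have ht : PySem.Int.mod (spar xs + x) 2 = 0 := by rw [htg, h]
      rw [h] at hc
      have hp0 : pcnt (x :: xs) 0 = 1 + pcnt xs 0 := by simp [pcnt, h]
      have hp1 : pcnt (x :: xs) 1 = pcnt xs 1 := by simp [pcnt, h]
      rw [h, hp0, hp1, hg, hc]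
      simp only [bStep, ht]
      norm_num [Prod.mk.injEq, max_def]
      all_goals omega
    · have ht : PySem.Int.mod (spar xs + x) 2 = 1 := by rw [htg, h]
      rw [h] at hc
      have hp0 : pcnt (x :: xs) 0 = pcnt xs 0 := by simp [pcnt, h]
      have hp1 : pcnt (x :: xs) 1 = 1 + pcnt xs 1 := by simp [pcnt, h]
      rw [h, hp0, hp1, hg, hc]
      simp only [bStep, ht]
      norm_num [Prod.mk.injEq, max_def]
      all_goals omega

lemma alt_eq_gbest (nums : List Int) : longest_even_sum_subarray_alt nums = gbest nums := by
  unfold longest_even_sum_subarray_alt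
  rw [List.foldl_reverse, B_inv]

-- ===== VERDICT (by name: the statement is the Claim_ definition above) =====
theorem longest_even_sum_subarray_spec : Claim_equal_longest_even_sum_subarray := by
  intro nums _
  unfold Spec_longest_even_sum_subarray
  rw [alt_eq_gbest]
  cases nums with
  | nil => simp [longest_even_sum_subarray, gbest]
  | cons x xs =>
    unfold longest_even_sum_subarray
    rw [if_neg (by simp)]
    have hmap : (PySem.List.pyRange 0 ((x :: xs).length : Int) 1).map (fun start =>
        ((PySem.List.pyRange start ((x :: xs).length : Int) 1).foldl
          (fun st e => aInner st (PySem.List.pyGetD (x :: xs) e 0)) (0, 0)).2)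
        = aList (x :: xs) := by
      rw [PySem.List.pyRange_zero_nat, List.map_map]
      unfold aList
      apply List.map_congr_left
      intro k hk
      simp only [Function.comp]
      rw [PySem.List.foldl_pyRange_pyGetD' (x :: xs) 0 aInner (0, 0) (Int.natCast_nonneg k)]
      rw [Int.toNat_natCast, inner_eq]
      omega
    rw [hmap, aList_cons, PySem.List.max?_id_cons, Option.getD_some, maxA]
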